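/- GENERATED by farm/mkstatement.py from design/units.tsv (unit `abs`) and the Specs of Vorbis/Spec/*.lean — do not edit.
   THE STATEMENT of the proof unit `abs`: the function `abs` (6 instructions) satisfies its contract,
   given the contracts of its callees. What the names mean: Vorbis/Spec/Basic.lean. The theorem to prove:
   `theorem abs_ok : Vorbis.Spec.abs.Statement`. -/
import Vorbis.Spec.LibcMisc
namespace Vorbis.Spec.abs
open X86 X86.User Asan

/-- The statement of unit `abs`. -/
def Statement : Prop :=
  ∀ (Lay : Layout) (_hLay : Lay.hi = 0x1000000) (μ : Microarch) (_hμ : UserX.MicroOK μ) (u₀ : State)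
    (_hcode : HasCodeNat Lay u₀ Vorbis.L.abs.entry Vorbis.Code.code_abs.nat Vorbis.L.abs.size),
    ∀ (others : List Obj) (frames : List (Nat × FrameLayout)), Calls Lay μ Vorbis.WayInv (Vorbis.conv u₀) Vorbis.L.abs.entry (Vorbis.Spec.abs.spec others frames)

end Vorbis.Spec.abs
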